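-- pv_equiv track=rewrite | github.com/eos60614/colpali-vespa-visual-retrieval | backend/drawing_regions.py | _cluster_lines_by_position
-- ===== SOURCE A (Python) =====
-- def _cluster_lines_by_position(lines, axis, gap_threshold):
--     """Cluster lines by their position on the given axis, grouping nearby lines."""
--     if not lines:
--         return []
--     sorted_lines = sorted(lines, key=lambda ln: ln[axis])
--     clusters = [[sorted_lines[0]]]
--     for line in sorted_lines[1:]:
--         if line[axis] - clusters[-1][-1][axis] < gap_threshold:
--             clusters[-1].append(line)
--         else:
--             clusters.append([line])
--     return clusters
-- ===== SOURCE B (Python) =====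
-- def _cluster_lines_by_position(lines, axis, gap_threshold):
--     """Cluster lines by position: two-pointer scan over the sorted list, emitting whole segments as slices."""
--     s = sorted(lines, key=lambda ln: ln[axis])
--     n = len(s)
--     out = []
--     i = 0
--     while i < n:
--         j = i + 1
--         while j < n and s[j][axis] - s[j - 1][axis] < gap_threshold:
--             j += 1
--         out.append(s[i:j])
--         i = j
--     return out
-- ===== Notes on version B (the rewrite author's own statement) =====
-- stated objective: alternative
-- what changed: A grows clusters by appending each line to the last cluster one element at a time; B runs a two-pointer scan over the sorted list, advancing j past each run of small gaps and emitting the whole cluster as one slice s[i:j].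
import Mathlib
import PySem

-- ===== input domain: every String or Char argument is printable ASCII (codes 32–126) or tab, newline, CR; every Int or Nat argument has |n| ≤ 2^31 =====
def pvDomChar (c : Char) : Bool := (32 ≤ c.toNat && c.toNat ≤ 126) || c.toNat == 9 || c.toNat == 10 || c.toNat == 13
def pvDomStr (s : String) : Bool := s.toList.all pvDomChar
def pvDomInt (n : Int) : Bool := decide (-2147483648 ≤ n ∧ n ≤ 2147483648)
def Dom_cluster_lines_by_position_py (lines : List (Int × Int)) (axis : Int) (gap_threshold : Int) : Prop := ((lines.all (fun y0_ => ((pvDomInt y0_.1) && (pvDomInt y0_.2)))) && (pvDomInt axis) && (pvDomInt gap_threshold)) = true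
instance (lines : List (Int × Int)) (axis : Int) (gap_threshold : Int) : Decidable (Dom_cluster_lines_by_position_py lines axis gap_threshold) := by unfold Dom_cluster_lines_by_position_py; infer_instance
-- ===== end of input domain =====

-- B replaces A's element-at-a-time cluster growth by a two-pointer scan emitting each cluster as one slice; equal return values proved on Pre_.

-- ===== PORT A =====
-- the key lambda `ln[axis]` shared by both Pythons (a 2-tuple indexed by axis; Pre_ keeps axis a valid index)
def pvLineKey (axis : Int) (p : Int × Int) : Int := (PySem.List.pyGet? [p.1, p.2] axis).getD 0

-- the body of A's for-loop: clusters kept with newest cluster first, each cluster reversed; clusters[-1][-1] is the head of the head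
def pvStepA (axis gap_threshold : Int) (clusters : List (List (Int × Int))) (line : Int × Int) : List (List (Int × Int)) :=
  match clusters with
  | (p :: c) :: cs =>
      if pvLineKey axis line - pvLineKey axis p < gap_threshold then (line :: p :: c) :: cs
      else [line] :: (p :: c) :: cs
  | _ => clusters

def cluster_lines_by_position_py (lines : List (Int × Int)) (axis : Int) (gap_threshold : Int) : List (List (Int × Int)) :=
  if lines = [] then []
  else
    match PySem.List.sorted lines (pvLineKey axis) with
    | [] => []
    | x :: rest =>
      ((rest.foldl (pvStepA axis gap_threshold) [[x]]).map List.reverse).reverse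

-- ===== PORT B =====
-- inner while: advance j while the gap to the previous line stays below the threshold
def pvAdvB (s : List (Int × Int)) (axis gap_threshold : Int) (j : Nat) : Nat :=
  if h : j < s.length ∧ pvLineKey axis (s.getD j (0, 0)) - pvLineKey axis (s.getD (j - 1) (0, 0)) < gap_threshold then
    pvAdvB s axis gap_threshold (j + 1)
  else j
termination_by s.length - j
decreasing_by omega

theorem le_pvAdvB (s : List (Int × Int)) (axis gap_threshold : Int) (j : Nat) :
    j ≤ pvAdvB s axis gap_threshold j := by
  fun_induction pvAdvB s axis gap_threshold j with
  | case1 j h ih => omega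
  | case2 j h => omega

-- outer while: emit the slice s[i:j] and restart at j
def pvOuterB (s : List (Int × Int)) (axis gap_threshold : Int) (i : Nat) : List (List (Int × Int)) :=
  if h : i < s.length then
    PySem.List.slice s (some (i : Int)) (some ((pvAdvB s axis gap_threshold (i + 1) : Nat) : Int)) ::
      pvOuterB s axis gap_threshold (pvAdvB s axis gap_threshold (i + 1))
  else []
termination_by s.length - i
decreasing_by have := le_pvAdvB s axis gap_threshold (i + 1); omega

def cluster_lines_by_position_py_alt (lines : List (Int × Int)) (axis : Int) (gap_threshold : Int) : List (List (Int × Int)) :=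
  pvOuterB (PySem.List.sorted lines (pvLineKey axis)) axis gap_threshold 0

-- ===== PRECONDITION & SPEC =====
-- Pre_ excludes exactly the inputs where Python raises IndexError: a nonempty list with axis outside {-2,-1,0,1} (indexing a 2-tuple).
def Pre_cluster_lines_by_position_py (lines : List (Int × Int)) (axis : Int) (gap_threshold : Int) : Prop :=
  lines = [] ∨ axis = 0 ∨ axis = 1 ∨ axis = -1 ∨ axis = -2
instance (lines : List (Int × Int)) (axis : Int) (gap_threshold : Int) : Decidable (Pre_cluster_lines_by_position_py lines axis gap_threshold) := by unfold Pre_cluster_lines_by_position_py; infer_instance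

def pvWitness_cluster_lines_by_position_py : (List (Int × Int)) × Int × Int := ([(0, 3), (1, 10), (2, 4)], 0, 5)

def Spec_cluster_lines_by_position_py (lines : List (Int × Int)) (axis : Int) (gap_threshold : Int) (out : List (List (Int × Int))) : Prop := out = cluster_lines_by_position_py_alt lines axis gap_threshold
instance (lines : List (Int × Int)) (axis : Int) (gap_threshold : Int) (out : List (List (Int × Int))) : Decidable (Spec_cluster_lines_by_position_py lines axis gap_threshold out) := by unfold Spec_cluster_lines_by_position_py; infer_instance

-- ===== CLAIM (what is proved, stated in full; the proofs are below) =====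
def Claim_equal_cluster_lines_by_position_py : Prop := ∀ (lines : List (Int × Int)) (axis : Int) (gap_threshold : Int), Dom_cluster_lines_by_position_py lines axis gap_threshold → Pre_cluster_lines_by_position_py lines axis gap_threshold → Spec_cluster_lines_by_position_py lines axis gap_threshold (cluster_lines_by_position_py lines axis gap_threshold)

-- ===== LEMMAS AND PROOFS =====

-- canonical clustering by consecutive gaps: the common meaning of both loops
def pvChunk (axis gap_threshold : Int) : List (Int × Int) → List (List (Int × Int))
  | [] => []
  | [x] => [[x]]
  | x :: y :: ys =>
    if pvLineKey axis y - pvLineKey axis x < gap_threshold then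
      match pvChunk axis gap_threshold (y :: ys) with
      | c :: cs => (x :: c) :: cs
      | [] => [[x]]
    else [x] :: pvChunk axis gap_threshold (y :: ys)

theorem pvChunk_ne_nil (axis g : Int) (x : Int × Int) (xs : List (Int × Int)) :
    pvChunk axis g (x :: xs) ≠ [] := by
  cases xs with
  | nil => simp [pvChunk]
  | cons y ys =>
    simp only [pvChunk]
    split
    · cases h : pvChunk axis g (y :: ys) <;> simp
    · simp

def pvPrependFirst (l : List (Int × Int)) : List (List (Int × Int)) → List (List (Int × Int))
  | [] => [l]
  | c :: cs => (l ++ c) :: cs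

theorem pvFoldA_chunk (axis g : Int) (xs : List (Int × Int)) :
    ∀ (p : Int × Int) (c : List (Int × Int)) (cs : List (List (Int × Int))),
      ((List.foldl (pvStepA axis g) ((p :: c) :: cs) xs).map List.reverse).reverse
        = (cs.map List.reverse).reverse ++ pvPrependFirst c.reverse (pvChunk axis g (p :: xs)) := by
  induction xs with
  | nil =>
    intro p c cs
    simp [pvChunk, pvPrependFirst]
  | cons y ys ih =>
    intro p c cs
    simp only [List.foldl_cons, pvStepA]
    by_cases hcond : pvLineKey axis y - pvLineKey axis p < g
    · rw [if_pos hcond]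
      rw [ih y (p :: c) cs]
      have hne := pvChunk_ne_nil axis g y ys
      obtain ⟨c0, cs0, hc⟩ : ∃ c0 cs0, pvChunk axis g (y :: ys) = c0 :: cs0 := by
        cases h : pvChunk axis g (y :: ys) with
        | nil => exact absurd h hne
        | cons a b => exact ⟨a, b, rfl⟩
      simp only [pvChunk, if_pos hcond, hc, pvPrependFirst, List.reverse_cons]
      simp
    · rw [if_neg hcond]
      rw [ih y [] ((p :: c) :: cs)]
      have hne := pvChunk_ne_nil axis g y ys
      obtain ⟨c0, cs0, hc⟩ : ∃ c0 cs0, pvChunk axis g (y :: ys) = c0 :: cs0 := by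
        cases h : pvChunk axis g (y :: ys) with
        | nil => exact absurd h hne
        | cons a b => exact ⟨a, b, rfl⟩
      simp only [pvChunk, if_neg hcond, hc, pvPrependFirst, List.reverse_cons, List.reverse_nil,
        List.nil_append, List.map_cons]
      simp

theorem pvA_eq_chunk (axis g : Int) (x : Int × Int) (xs : List (Int × Int)) :
    ((List.foldl (pvStepA axis g) [[x]] xs).map List.reverse).reverse = pvChunk axis g (x :: xs) := by
  have h := pvFoldA_chunk axis g xs x [] []
  have hne := pvChunk_ne_nil axis g x xs
  obtain ⟨c0, cs0, hc⟩ : ∃ c0 cs0, pvChunk axis g (x :: xs) = c0 :: cs0 := by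
    cases hh : pvChunk axis g (x :: xs) with
    | nil => exact absurd hh hne
    | cons a b => exact ⟨a, b, rfl⟩
  simpa [hc, pvPrependFirst] using h

theorem pvAdvB_le_length (s : List (Int × Int)) (axis g : Int) (j : Nat) (hj : j ≤ s.length) :
    pvAdvB s axis g j ≤ s.length := by
  fun_induction pvAdvB s axis g j with
  | case1 j h ih => exact ih (by omega)
  | case2 j h => exact hj

theorem pvChunk_adv (s : List (Int × Int)) (axis g : Int) :
    ∀ (j : Nat), 1 ≤ j → j ≤ s.length →
      pvChunk axis g (s.drop (j - 1))
        = (s.drop (j - 1)).take (pvAdvB s axis g j - (j - 1)) :: pvChunk axis g (s.drop (pvAdvB s axis g j)) := by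
  intro j h1 h2
  fun_induction pvAdvB s axis g j with
  | case1 j h ih =>
    have hjlen : j < s.length := h.1
    have hj1 : j - 1 < s.length := by omega
    have hd1 : s.drop (j - 1) = s[j - 1] :: s.drop j := by
      have e := List.drop_eq_getElem_cons hj1
      rwa [show j - 1 + 1 = j by omega] at e
    have hd2 : s.drop j = s[j] :: s.drop (j + 1) := List.drop_eq_getElem_cons hjlen
    have hcond : pvLineKey axis s[j] - pvLineKey axis s[j - 1] < g := by
      have e1 : s.getD j (0, 0) = s[j] := List.getD_eq_getElem s (0,0) hjlen
      have e2 : s.getD (j - 1) (0, 0) = s[j - 1] := List.getD_eq_getElem s (0,0) hj1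
      rw [e1, e2] at h
      exact h.2
    have hrec := ih (by omega) (by omega)
    have hstep : j + 1 - 1 = j := by omega
    rw [hstep] at hrec
    have hadv1 : j + 1 ≤ pvAdvB s axis g (j + 1) := le_pvAdvB s axis g (j + 1)
    rw [hd1]
    simp only [hd2, pvChunk, if_pos hcond]
    rw [← hd2, hrec]
    have htake : (s.drop (j - 1)).take (pvAdvB s axis g (j + 1) - (j - 1))
        = s[j - 1] :: (s.drop j).take (pvAdvB s axis g (j + 1) - j) := by
      rw [hd1]
      have : pvAdvB s axis g (j + 1) - (j - 1) = (pvAdvB s axis g (j + 1) - j) + 1 := by omega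
      rw [this, List.take_succ_cons]
    rw [hd1] at htake
    rw [htake]
  | case2 j h =>
    have hj1 : j - 1 < s.length := by omega
    have hd1 : s.drop (j - 1) = s[j - 1] :: s.drop j := by
      have e := List.drop_eq_getElem_cons hj1
      rwa [show j - 1 + 1 = j by omega] at e
    have hsub : j - (j - 1) = 1 := by omega
    by_cases hjn : j < s.length
    · have hcond : ¬ pvLineKey axis (s.getD j (0, 0)) - pvLineKey axis (s.getD (j - 1) (0, 0)) < g := by
        intro hc; exact h ⟨hjn, hc⟩
      have e1 : s.getD j (0, 0) = s[j] := List.getD_eq_getElem s (0,0) hjn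
      have e2 : s.getD (j - 1) (0, 0) = s[j - 1] := List.getD_eq_getElem s (0,0) hj1
      rw [e1, e2] at hcond
      have hd2 : s.drop j = s[j] :: s.drop (j + 1) := List.drop_eq_getElem_cons hjn
      rw [hd1]
      simp only [hd2, pvChunk, if_neg hcond]
      rw [← hd2, hsub]
      simp
    · have hjeq : j = s.length := by omega
      have hd2 : s.drop j = [] := by rw [hjeq, List.drop_length]
      rw [hd1, hd2, hsub]
      simp [pvChunk]

theorem pvOuterB_eq_chunk (s : List (Int × Int)) (axis g : Int) :
    ∀ (i : Nat), pvOuterB s axis g i = pvChunk axis g (s.drop i) := by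
  intro i
  fun_induction pvOuterB s axis g i with
  | case1 i h ih =>
    have hadv1 : i + 1 ≤ pvAdvB s axis g (i + 1) := le_pvAdvB s axis g (i + 1)
    have hadvn : pvAdvB s axis g (i + 1) ≤ s.length := pvAdvB_le_length s axis g (i + 1) (by omega)
    have hch := pvChunk_adv s axis g (i + 1) (by omega) (by omega)
    have hstep : i + 1 - 1 = i := by omega
    rw [hstep] at hch
    rw [ih, hch]
    congr 1
    rw [PySem.List.slice_natCast]
  | case2 i h =>
    have : s.drop i = [] := List.drop_eq_nil_of_le (by omega)
    simp [this, pvChunk]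

-- ===== VERDICT (by name: the statement is the Claim_ definition above) =====
theorem cluster_lines_by_position_py_spec : Claim_equal_cluster_lines_by_position_py := by
  intro lines axis g _ _
  unfold Spec_cluster_lines_by_position_py
  unfold cluster_lines_by_position_py cluster_lines_by_position_py_alt
  by_cases hl : lines = []
  · subst hl
    simp [PySem.List.sorted, pvOuterB]
  · rw [if_neg hl]
    cases hs : PySem.List.sorted lines (pvLineKey axis) with
    | nil => exact absurd ((PySem.List.sorted_eq_nil_iff lines (pvLineKey axis) false).mp hs) hl
    | cons x xs =>
      show ((List.foldl (pvStepA axis g) [[x]] xs).map List.reverse).reverse = pvOuterB (x :: xs) axis g 0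
      rw [pvA_eq_chunk, pvOuterB_eq_chunk]
      simp
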